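-- pv_equiv track=rewrite | github.com/chadhakunal/stack-overflow-user-query | collectData/getData.py | text_prepare_questions
-- ===== SOURCE A (Python) =====
-- def text_prepare_questions(text):
--     htmlCodes = (
--             ("'", '&#39;'),
--             ('"', '&quot;'),
--             ('>', '&gt;'),
--             ('<', '&lt;'),
--             ('&', '&amp;')
--         )
--     for code in htmlCodes:
--         text = text.replace(code[1], code[0])
--     return text
-- ===== SOURCE B (Python) =====
-- def text_prepare_questions(text):
--     entities = (('&#39;', "'"), ('&quot;', '"'), ('&gt;', '>'), ('&lt;', '<'), ('&amp;', '&'))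
--     out = []
--     i = 0
--     n = len(text)
--     while i < n:
--         for ent, ch in entities:
--             if text.startswith(ent, i):
--                 out.append(ch)
--                 i += len(ent)
--                 break
--         else:
--             out.append(text[i])
--             i += 1
--     return ''.join(out)
-- ===== Notes on version B (the rewrite author's own statement) =====
-- stated objective: alternative
-- what changed: Replaces five sequential full-string .replace passes by a single left-to-right scan that matches any of the five entities at the current position and emits its character; equivalent because entity occurrences cannot overlap and no replacement output creates a later entity to the scanner's left.
import Mathlib
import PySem

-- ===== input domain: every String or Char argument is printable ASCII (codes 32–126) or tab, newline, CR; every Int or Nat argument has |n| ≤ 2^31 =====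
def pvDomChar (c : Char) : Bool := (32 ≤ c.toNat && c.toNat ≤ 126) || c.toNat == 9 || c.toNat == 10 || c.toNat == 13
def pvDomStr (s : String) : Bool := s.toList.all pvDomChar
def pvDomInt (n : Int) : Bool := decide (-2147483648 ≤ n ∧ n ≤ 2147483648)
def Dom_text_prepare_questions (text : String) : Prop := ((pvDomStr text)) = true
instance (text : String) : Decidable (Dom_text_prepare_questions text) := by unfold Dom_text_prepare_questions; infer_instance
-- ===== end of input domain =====

-- B replaces A's five sequential full-string replace passes by a single left-to-right scan
-- with an entity table (alternative decomposition; same return value, no speed claim).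

-- ===== PORT A =====
def text_prepare_questions (text : String) : String :=
  (([("'", "&#39;"), ("\"", "&quot;"), (">", "&gt;"), ("<", "&lt;"), ("&", "&amp;")] :
      List (String × String)).foldl
    (fun t code => PySem.Str.replace t code.2 code.1) text)

-- ===== PORT B =====
-- single pass: at each position try the five entities in order, else copy the character
def pvUnesc : List Char → List Char
  | [] => []
  | c :: t =>
    if List.isPrefixOf ['&', '#', '3', '9', ';'] (c :: t) then '\'' :: pvUnesc (t.drop 4)
    else if List.isPrefixOf ['&', 'q', 'u', 'o', 't', ';'] (c :: t) then '"' :: pvUnesc (t.drop 5)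
    else if List.isPrefixOf ['&', 'g', 't', ';'] (c :: t) then '>' :: pvUnesc (t.drop 3)
    else if List.isPrefixOf ['&', 'l', 't', ';'] (c :: t) then '<' :: pvUnesc (t.drop 3)
    else if List.isPrefixOf ['&', 'a', 'm', 'p', ';'] (c :: t) then '&' :: pvUnesc (t.drop 4)
    else c :: pvUnesc t
  termination_by l => l.length
  decreasing_by all_goals (simp [List.length_drop]; try omega)

def text_prepare_questions_alt (text : String) : String :=
  String.ofList (pvUnesc text.toList)

-- ===== PRECONDITION & SPEC =====
def Spec_text_prepare_questions (text : String) (out : String) : Prop := out = text_prepare_questions_alt text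
instance (text : String) (out : String) : Decidable (Spec_text_prepare_questions text out) := by unfold Spec_text_prepare_questions; infer_instance

-- ===== CLAIM (what is proved, stated in full; the proofs are below) =====
def Claim_equal_text_prepare_questions : Prop := ∀ (text : String), Dom_text_prepare_questions text → Spec_text_prepare_questions text (text_prepare_questions text)

-- ===== LEMMAS AND PROOFS =====

-- recursive characterisation of Python str.replace for a nonempty pattern
def pvRepl (old new : List Char) (l : List Char) : List Char :=
  match l with
  | [] => []
  | c :: t =>
    if List.isPrefixOf old (c :: t) then new ++ pvRepl old new (t.drop (old.length - 1))
    else c :: pvRepl old new t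
  termination_by l.length
  decreasing_by all_goals (simp [List.length_drop]; try omega)

theorem pvRepl_go (o : Char) (ot new : List Char) :
    ∀ (fuel : Nat) (l acc : List Char), l.length ≤ fuel →
      PySem.Chars.replace.go (o :: ot) new fuel l acc = acc.reverse ++ pvRepl (o :: ot) new l := by
  intro fuel
  induction fuel with
  | zero =>
    intro l acc h
    have : l = [] := List.eq_nil_of_length_eq_zero (Nat.le_zero.mp h)
    subst this
    simp [PySem.Chars.replace.go, pvRepl]
  | succ fuel ih =>
    intro l acc h
    match l with
    | [] => simp [PySem.Chars.replace.go, pvRepl]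
    | c :: t =>
      rw [PySem.Chars.replace.go]
      by_cases hp : List.isPrefixOf (o :: ot) (c :: t)
      · rw [if_pos hp]
        have hlen : ((c :: t).drop (o :: ot).length).length ≤ fuel := by
          simp at h ⊢; omega
        rw [ih _ _ hlen]
        have hdrop : (c :: t).drop (o :: ot).length = t.drop ((o :: ot).length - 1) := by
          simp
        rw [hdrop]
        conv_rhs => rw [pvRepl]
        rw [if_pos hp]
        simp
      · rw [if_neg hp]
        have hlen : t.length ≤ fuel := by simp at h; omega
        rw [ih _ _ hlen]
        conv_rhs => rw [pvRepl]
        rw [if_neg hp]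
        simp

theorem pvReplace_eq (o : Char) (ot new l : List Char) :
    PySem.Chars.replace l (o :: ot) new = pvRepl (o :: ot) new l := by
  rw [PySem.Chars.replace]
  simp [pvRepl_go o ot new l.length l [] (le_refl _)]

theorem pvRepl_pos (o : Char) (ot new rest : List Char) :
    pvRepl (o :: ot) new ((o :: ot) ++ rest) = new ++ pvRepl (o :: ot) new rest := by
  rw [show (o :: ot) ++ rest = o :: (ot ++ rest) from rfl, pvRepl]
  rw [if_pos (by rw [List.isPrefixOf_iff_prefix]; exact ⟨rest, rfl⟩)]
  simp

theorem pvRepl_neg (old new : List Char) (c : Char) (t : List Char)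
    (h : ¬ old <+: (c :: t)) :
    pvRepl old new (c :: t) = c :: pvRepl old new t := by
  rw [pvRepl]
  rw [if_neg (by simpa [List.isPrefixOf_iff_prefix] using h)]

theorem pvRepl_skip (ot new : List Char) :
    ∀ (p l : List Char), '&' ∉ p →
      pvRepl ('&' :: ot) new (p ++ l) = p ++ pvRepl ('&' :: ot) new l := by
  intro p
  induction p with
  | nil => simp
  | cons c p' ih =>
    intro l hmem
    have hc : c ≠ '&' := by
      intro h; exact hmem (by simp [h])
    have hnp : ¬ ('&' :: ot) <+: (c :: (p' ++ l)) := by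
      intro h
      exact hc ((List.cons_prefix_cons.mp h).1.symm)
    rw [List.cons_append, pvRepl_neg _ _ _ _ hnp, ih l (fun h => hmem (by simp [h]))]
    simp

theorem pvRepl_prefix_reflect (ot : List Char) (r : Char) :
    ∀ (l p : List Char), '&' ∉ p → r ∉ p →
      p <+: pvRepl ('&' :: ot) [r] l → p <+: l := by
  have H : ∀ (n : Nat) (l : List Char), l.length ≤ n → ∀ (p : List Char), '&' ∉ p → r ∉ p →
      p <+: pvRepl ('&' :: ot) [r] l → p <+: l := by
    intro n
    induction n with
    | zero =>
      intro l hl p _ _ hp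
      have : l = [] := List.eq_nil_of_length_eq_zero (Nat.le_zero.mp hl)
      subst this
      rw [pvRepl] at hp
      exact hp
    | succ n ih =>
      intro l hl p hamp hr hp
      match l with
      | [] =>
        rw [pvRepl] at hp
        exact hp
      | c :: t =>
        by_cases hpre : List.isPrefixOf ('&' :: ot) (c :: t)
        · rw [pvRepl, if_pos hpre] at hp
          match p with
          | [] => exact List.nil_prefix
          | d :: p' =>
            exfalso
            have : d = r := ((List.cons_prefix_cons.mp hp).1)
            exact hr (by simp [this])
        · rw [pvRepl, if_neg hpre] at hp
          match p with
          | [] => exact List.nil_prefix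
          | d :: p' =>
            obtain ⟨hd, hp'⟩ := List.cons_prefix_cons.mp hp
            have hlt : t.length ≤ n := by simp at hl; omega
            have ht := ih t hlt p' (fun h => hamp (by simp [h])) (fun h => hr (by simp [h])) hp'
            exact List.cons_prefix_cons.mpr ⟨hd, ht⟩
  exact fun l => H l.length l (le_refl _)

theorem pvRepl_nil (old new : List Char) : pvRepl old new [] = [] := by rw [pvRepl.eq_def]
theorem pvUnesc_nil : pvUnesc [] = [] := by rw [pvUnesc.eq_def]

theorem pvNotPrefix (a b : Char) (p q : List Char) (h : a ≠ b) : ¬ (a :: p) <+: (b :: q) :=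
  fun hp => h (List.cons_prefix_cons.mp hp).1

theorem pvNotPrefix2 (a b c : Char) (p q : List Char) (h : b ≠ c) : ¬ (a :: b :: p) <+: (a :: c :: q) :=
  fun hp => pvNotPrefix b c p q h (List.cons_prefix_cons.mp hp).2

theorem pvRepl_neg_head (c₀ : Char) (ot new : List Char) (c : Char) (t : List Char) (h : c₀ ≠ c) :
    pvRepl (c₀ :: ot) new (c :: t) = c :: pvRepl (c₀ :: ot) new t :=
  pvRepl_neg _ _ _ _ (pvNotPrefix _ _ _ _ h)

theorem pvRepl_skip_ent (ot new : List Char) (a : Char) (tk X : List Char)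
    (hmem : '&' ∉ (a :: tk)) (hne : ¬ ot <+: (a :: tk) ++ X) :
    pvRepl ('&' :: ot) new ('&' :: ((a :: tk) ++ X)) = '&' :: ((a :: tk) ++ pvRepl ('&' :: ot) new X) := by
  rw [pvRepl_neg _ _ _ _ (fun h => hne (List.cons_prefix_cons.mp h).2),
      pvRepl_skip _ _ _ _ hmem]

theorem pvS12 (X : List Char) : pvRepl ['&','#','3','9',';'] ['\''] ('&'::'q'::'u'::'o'::'t'::';'::X) = '&'::'q'::'u'::'o'::'t'::';'::(pvRepl ['&','#','3','9',';'] ['\''] X) := by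
  simpa using pvRepl_skip_ent ['#','3','9',';'] ['\''] 'q' ['u','o','t',';'] X (by decide) (pvNotPrefix '#' 'q' _ _ (by decide))
theorem pvS13 (X : List Char) : pvRepl ['&','#','3','9',';'] ['\''] ('&'::'g'::'t'::';'::X) = '&'::'g'::'t'::';'::(pvRepl ['&','#','3','9',';'] ['\''] X) := by
  simpa using pvRepl_skip_ent ['#','3','9',';'] ['\''] 'g' ['t',';'] X (by decide) (pvNotPrefix '#' 'g' _ _ (by decide))
theorem pvS14 (X : List Char) : pvRepl ['&','#','3','9',';'] ['\''] ('&'::'l'::'t'::';'::X) = '&'::'l'::'t'::';'::(pvRepl ['&','#','3','9',';'] ['\''] X) := by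
  simpa using pvRepl_skip_ent ['#','3','9',';'] ['\''] 'l' ['t',';'] X (by decide) (pvNotPrefix '#' 'l' _ _ (by decide))
theorem pvS15 (X : List Char) : pvRepl ['&','#','3','9',';'] ['\''] ('&'::'a'::'m'::'p'::';'::X) = '&'::'a'::'m'::'p'::';'::(pvRepl ['&','#','3','9',';'] ['\''] X) := by
  simpa using pvRepl_skip_ent ['#','3','9',';'] ['\''] 'a' ['m','p',';'] X (by decide) (pvNotPrefix '#' 'a' _ _ (by decide))
theorem pvS23 (X : List Char) : pvRepl ['&','q','u','o','t',';'] ['"'] ('&'::'g'::'t'::';'::X) = '&'::'g'::'t'::';'::(pvRepl ['&','q','u','o','t',';'] ['"'] X) := by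
  simpa using pvRepl_skip_ent ['q','u','o','t',';'] ['"'] 'g' ['t',';'] X (by decide) (pvNotPrefix 'q' 'g' _ _ (by decide))
theorem pvS24 (X : List Char) : pvRepl ['&','q','u','o','t',';'] ['"'] ('&'::'l'::'t'::';'::X) = '&'::'l'::'t'::';'::(pvRepl ['&','q','u','o','t',';'] ['"'] X) := by
  simpa using pvRepl_skip_ent ['q','u','o','t',';'] ['"'] 'l' ['t',';'] X (by decide) (pvNotPrefix 'q' 'l' _ _ (by decide))
theorem pvS25 (X : List Char) : pvRepl ['&','q','u','o','t',';'] ['"'] ('&'::'a'::'m'::'p'::';'::X) = '&'::'a'::'m'::'p'::';'::(pvRepl ['&','q','u','o','t',';'] ['"'] X) := by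
  simpa using pvRepl_skip_ent ['q','u','o','t',';'] ['"'] 'a' ['m','p',';'] X (by decide) (pvNotPrefix 'q' 'a' _ _ (by decide))
theorem pvS34 (X : List Char) : pvRepl ['&','g','t',';'] ['>'] ('&'::'l'::'t'::';'::X) = '&'::'l'::'t'::';'::(pvRepl ['&','g','t',';'] ['>'] X) := by
  simpa using pvRepl_skip_ent ['g','t',';'] ['>'] 'l' ['t',';'] X (by decide) (pvNotPrefix 'g' 'l' _ _ (by decide))
theorem pvS35 (X : List Char) : pvRepl ['&','g','t',';'] ['>'] ('&'::'a'::'m'::'p'::';'::X) = '&'::'a'::'m'::'p'::';'::(pvRepl ['&','g','t',';'] ['>'] X) := by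
  simpa using pvRepl_skip_ent ['g','t',';'] ['>'] 'a' ['m','p',';'] X (by decide) (pvNotPrefix 'g' 'a' _ _ (by decide))
theorem pvS45 (X : List Char) : pvRepl ['&','l','t',';'] ['<'] ('&'::'a'::'m'::'p'::';'::X) = '&'::'a'::'m'::'p'::';'::(pvRepl ['&','l','t',';'] ['<'] X) := by
  simpa using pvRepl_skip_ent ['l','t',';'] ['<'] 'a' ['m','p',';'] X (by decide) (pvNotPrefix 'l' 'a' _ _ (by decide))

theorem pvP1 (X : List Char) : pvRepl ['&','#','3','9',';'] ['\''] ('&'::'#'::'3'::'9'::';'::X) = '\'' :: pvRepl ['&','#','3','9',';'] ['\''] X := by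
  simpa using pvRepl_pos '&' ['#','3','9',';'] ['\''] X
theorem pvP2 (X : List Char) : pvRepl ['&','q','u','o','t',';'] ['"'] ('&'::'q'::'u'::'o'::'t'::';'::X) = '"' :: pvRepl ['&','q','u','o','t',';'] ['"'] X := by
  simpa using pvRepl_pos '&' ['q','u','o','t',';'] ['"'] X
theorem pvP3 (X : List Char) : pvRepl ['&','g','t',';'] ['>'] ('&'::'g'::'t'::';'::X) = '>' :: pvRepl ['&','g','t',';'] ['>'] X := by
  simpa using pvRepl_pos '&' ['g','t',';'] ['>'] X
theorem pvP4 (X : List Char) : pvRepl ['&','l','t',';'] ['<'] ('&'::'l'::'t'::';'::X) = '<' :: pvRepl ['&','l','t',';'] ['<'] X := by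
  simpa using pvRepl_pos '&' ['l','t',';'] ['<'] X
theorem pvP5 (X : List Char) : pvRepl ['&','a','m','p',';'] ['&'] ('&'::'a'::'m'::'p'::';'::X) = '&' :: pvRepl ['&','a','m','p',';'] ['&'] X := by
  simpa using pvRepl_pos '&' ['a','m','p',';'] ['&'] X

theorem pvUnesc_e1 (X : List Char) : pvUnesc ('&'::'#'::'3'::'9'::';'::X) = '\'' :: pvUnesc X := by
  rw [pvUnesc, if_pos (by simp [List.isPrefixOf])]
  simp
theorem pvUnesc_e2 (X : List Char) : pvUnesc ('&'::'q'::'u'::'o'::'t'::';'::X) = '"' :: pvUnesc X := by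
  rw [pvUnesc,
      if_neg (by rw [List.isPrefixOf_iff_prefix]; exact pvNotPrefix2 '&' '#' 'q' _ _ (by decide)),
      if_pos (by simp [List.isPrefixOf])]
  simp
theorem pvUnesc_e3 (X : List Char) : pvUnesc ('&'::'g'::'t'::';'::X) = '>' :: pvUnesc X := by
  rw [pvUnesc,
      if_neg (by rw [List.isPrefixOf_iff_prefix]; exact pvNotPrefix2 '&' '#' 'g' _ _ (by decide)),
      if_neg (by rw [List.isPrefixOf_iff_prefix]; exact pvNotPrefix2 '&' 'q' 'g' _ _ (by decide)),
      if_pos (by simp [List.isPrefixOf])]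
  simp
theorem pvUnesc_e4 (X : List Char) : pvUnesc ('&'::'l'::'t'::';'::X) = '<' :: pvUnesc X := by
  rw [pvUnesc,
      if_neg (by rw [List.isPrefixOf_iff_prefix]; exact pvNotPrefix2 '&' '#' 'l' _ _ (by decide)),
      if_neg (by rw [List.isPrefixOf_iff_prefix]; exact pvNotPrefix2 '&' 'q' 'l' _ _ (by decide)),
      if_neg (by rw [List.isPrefixOf_iff_prefix]; exact pvNotPrefix2 '&' 'g' 'l' _ _ (by decide)),
      if_pos (by simp [List.isPrefixOf])]
  simp
theorem pvUnesc_e5 (X : List Char) : pvUnesc ('&'::'a'::'m'::'p'::';'::X) = '&' :: pvUnesc X := by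
  rw [pvUnesc,
      if_neg (by rw [List.isPrefixOf_iff_prefix]; exact pvNotPrefix2 '&' '#' 'a' _ _ (by decide)),
      if_neg (by rw [List.isPrefixOf_iff_prefix]; exact pvNotPrefix2 '&' 'q' 'a' _ _ (by decide)),
      if_neg (by rw [List.isPrefixOf_iff_prefix]; exact pvNotPrefix2 '&' 'g' 'a' _ _ (by decide)),
      if_neg (by rw [List.isPrefixOf_iff_prefix]; exact pvNotPrefix2 '&' 'l' 'a' _ _ (by decide)),
      if_pos (by simp [List.isPrefixOf])]
  simp

theorem pvUnesc_default (c : Char) (t : List Char)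
    (h1 : ¬ ['&','#','3','9',';'] <+: (c :: t))
    (h2 : ¬ ['&','q','u','o','t',';'] <+: (c :: t))
    (h3 : ¬ ['&','g','t',';'] <+: (c :: t))
    (h4 : ¬ ['&','l','t',';'] <+: (c :: t))
    (h5 : ¬ ['&','a','m','p',';'] <+: (c :: t)) :
    pvUnesc (c :: t) = c :: pvUnesc t := by
  rw [pvUnesc,
      if_neg (fun h => h1 (List.isPrefixOf_iff_prefix.mp h)),
      if_neg (fun h => h2 (List.isPrefixOf_iff_prefix.mp h)),
      if_neg (fun h => h3 (List.isPrefixOf_iff_prefix.mp h)),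
      if_neg (fun h => h4 (List.isPrefixOf_iff_prefix.mp h)),
      if_neg (fun h => h5 (List.isPrefixOf_iff_prefix.mp h))]

theorem pvMain : ∀ l : List Char,
    pvRepl ['&','a','m','p',';'] ['&']
      (pvRepl ['&','l','t',';'] ['<']
        (pvRepl ['&','g','t',';'] ['>']
          (pvRepl ['&','q','u','o','t',';'] ['"']
            (pvRepl ['&','#','3','9',';'] ['\''] l)))) = pvUnesc l := by
  have H : ∀ (n : Nat) (l : List Char), l.length ≤ n →
      pvRepl ['&','a','m','p',';'] ['&']
        (pvRepl ['&','l','t',';'] ['<']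
          (pvRepl ['&','g','t',';'] ['>']
            (pvRepl ['&','q','u','o','t',';'] ['"']
              (pvRepl ['&','#','3','9',';'] ['\''] l)))) = pvUnesc l := by
    intro n
    induction n with
    | zero =>
      intro l hl
      have : l = [] := List.eq_nil_of_length_eq_zero (Nat.le_zero.mp hl)
      subst this
      simp [pvRepl_nil, pvUnesc_nil]
    | succ n ih =>
      intro l hl
      match l with
      | [] => simp [pvRepl_nil, pvUnesc_nil]
      | c :: t =>
        by_cases h1 : ['&','#','3','9',';'] <+: (c :: t)
        · obtain ⟨rest, hrest⟩ := h1
          have hr : rest.length ≤ n := by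
            have := congrArg List.length hrest
            simp at this hl; omega
          rw [← hrest]
          simp only [List.cons_append, List.nil_append]
          rw [pvP1,
              pvRepl_neg_head '&' ['q','u','o','t',';'] ['"'] '\'' _ (by decide),
              pvRepl_neg_head '&' ['g','t',';'] ['>'] '\'' _ (by decide),
              pvRepl_neg_head '&' ['l','t',';'] ['<'] '\'' _ (by decide),
              pvRepl_neg_head '&' ['a','m','p',';'] ['&'] '\'' _ (by decide),
              pvUnesc_e1, ih rest hr]
        · by_cases h2 : ['&','q','u','o','t',';'] <+: (c :: t)
          · obtain ⟨rest, hrest⟩ := h2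
            have hr : rest.length ≤ n := by
              have := congrArg List.length hrest
              simp at this hl; omega
            rw [← hrest]
            simp only [List.cons_append, List.nil_append]
            rw [pvS12, pvP2,
                pvRepl_neg_head '&' ['g','t',';'] ['>'] '"' _ (by decide),
                pvRepl_neg_head '&' ['l','t',';'] ['<'] '"' _ (by decide),
                pvRepl_neg_head '&' ['a','m','p',';'] ['&'] '"' _ (by decide),
                pvUnesc_e2, ih rest hr]
          · by_cases h3 : ['&','g','t',';'] <+: (c :: t)
            · obtain ⟨rest, hrest⟩ := h3
              have hr : rest.length ≤ n := by
                have := congrArg List.length hrest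
                simp at this hl; omega
              rw [← hrest]
              simp only [List.cons_append, List.nil_append]
              rw [pvS13, pvS23, pvP3,
                  pvRepl_neg_head '&' ['l','t',';'] ['<'] '>' _ (by decide),
                  pvRepl_neg_head '&' ['a','m','p',';'] ['&'] '>' _ (by decide),
                  pvUnesc_e3, ih rest hr]
            · by_cases h4 : ['&','l','t',';'] <+: (c :: t)
              · obtain ⟨rest, hrest⟩ := h4
                have hr : rest.length ≤ n := by
                  have := congrArg List.length hrest
                  simp at this hl; omega
                rw [← hrest]
                simp only [List.cons_append, List.nil_append]
                rw [pvS14, pvS24, pvS34, pvP4,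
                    pvRepl_neg_head '&' ['a','m','p',';'] ['&'] '<' _ (by decide),
                    pvUnesc_e4, ih rest hr]
              · by_cases h5 : ['&','a','m','p',';'] <+: (c :: t)
                · obtain ⟨rest, hrest⟩ := h5
                  have hr : rest.length ≤ n := by
                    have := congrArg List.length hrest
                    simp at this hl; omega
                  rw [← hrest]
                  simp only [List.cons_append, List.nil_append]
                  rw [pvS15, pvS25, pvS35, pvS45, pvP5, pvUnesc_e5, ih rest hr]
                · have g1 := pvRepl_neg ['&','#','3','9',';'] ['\''] c t h1
                  have n2 : ¬ ['&','q','u','o','t',';'] <+: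
                      (c :: pvRepl ['&','#','3','9',';'] ['\''] t) := by
                    intro h
                    obtain ⟨hc, hp⟩ := List.cons_prefix_cons.mp h
                    exact h2 (List.cons_prefix_cons.mpr
                      ⟨hc, pvRepl_prefix_reflect ['#','3','9',';'] '\'' t _ (by decide) (by decide) hp⟩)
                  have g2 := pvRepl_neg ['&','q','u','o','t',';'] ['"'] c _ n2
                  have n3 : ¬ ['&','g','t',';'] <+:
                      (c :: pvRepl ['&','q','u','o','t',';'] ['"'] (pvRepl ['&','#','3','9',';'] ['\''] t)) := by
                    intro h
                    obtain ⟨hc, hp⟩ := List.cons_prefix_cons.mp h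
                    have hp1 := pvRepl_prefix_reflect ['q','u','o','t',';'] '"' _ _ (by decide) (by decide) hp
                    have hp2 := pvRepl_prefix_reflect ['#','3','9',';'] '\'' t _ (by decide) (by decide) hp1
                    exact h3 (List.cons_prefix_cons.mpr ⟨hc, hp2⟩)
                  have g3 := pvRepl_neg ['&','g','t',';'] ['>'] c _ n3
                  have n4 : ¬ ['&','l','t',';'] <+:
                      (c :: pvRepl ['&','g','t',';'] ['>'] (pvRepl ['&','q','u','o','t',';'] ['"'] (pvRepl ['&','#','3','9',';'] ['\''] t))) := by
                    intro h
                    obtain ⟨hc, hp⟩ := List.cons_prefix_cons.mp h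
                    have hp1 := pvRepl_prefix_reflect ['g','t',';'] '>' _ _ (by decide) (by decide) hp
                    have hp2 := pvRepl_prefix_reflect ['q','u','o','t',';'] '"' _ _ (by decide) (by decide) hp1
                    have hp3 := pvRepl_prefix_reflect ['#','3','9',';'] '\'' t _ (by decide) (by decide) hp2
                    exact h4 (List.cons_prefix_cons.mpr ⟨hc, hp3⟩)
                  have g4 := pvRepl_neg ['&','l','t',';'] ['<'] c _ n4
                  have n5 : ¬ ['&','a','m','p',';'] <+:
                      (c :: pvRepl ['&','l','t',';'] ['<'] (pvRepl ['&','g','t',';'] ['>'] (pvRepl ['&','q','u','o','t',';'] ['"'] (pvRepl ['&','#','3','9',';'] ['\''] t)))) := by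
                    intro h
                    obtain ⟨hc, hp⟩ := List.cons_prefix_cons.mp h
                    have hp1 := pvRepl_prefix_reflect ['l','t',';'] '<' _ _ (by decide) (by decide) hp
                    have hp2 := pvRepl_prefix_reflect ['g','t',';'] '>' _ _ (by decide) (by decide) hp1
                    have hp3 := pvRepl_prefix_reflect ['q','u','o','t',';'] '"' _ _ (by decide) (by decide) hp2
                    have hp4 := pvRepl_prefix_reflect ['#','3','9',';'] '\'' t _ (by decide) (by decide) hp3
                    exact h5 (List.cons_prefix_cons.mpr ⟨hc, hp4⟩)
                  have g5 := pvRepl_neg ['&','a','m','p',';'] ['&'] c _ n5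
                  rw [g1, g2, g3, g4, g5, pvUnesc_default c t h1 h2 h3 h4 h5,
                      ih t (by simp at hl; omega)]
  exact fun l => H l.length l (le_refl _)


-- ===== VERDICT (by name: the statement is the Claim_ definition above) =====
theorem text_prepare_questions_spec : Claim_equal_text_prepare_questions := by
  intro text _
  unfold Spec_text_prepare_questions text_prepare_questions text_prepare_questions_alt
  simp only [List.foldl]
  have h1 : ∀ s : String, PySem.Str.replace s "&#39;" "'" = String.ofList (pvRepl ['&','#','3','9',';'] ['\''] s.toList) := by
    intro s
    rw [PySem.Str.replace, show ("&#39;" : String).toList = (['&','#','3','9',';'] : List Char) from by decide,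
        show ("'" : String).toList = (['\''] : List Char) from by decide, pvReplace_eq]
  have h2 : ∀ s : String, PySem.Str.replace s "&quot;" "\"" = String.ofList (pvRepl ['&','q','u','o','t',';'] ['"'] s.toList) := by
    intro s
    rw [PySem.Str.replace, show ("&quot;" : String).toList = (['&','q','u','o','t',';'] : List Char) from by decide,
        show ("\"" : String).toList = (['"'] : List Char) from by decide, pvReplace_eq]
  have h3 : ∀ s : String, PySem.Str.replace s "&gt;" ">" = String.ofList (pvRepl ['&','g','t',';'] ['>'] s.toList) := by
    intro s
    rw [PySem.Str.replace, show ("&gt;" : String).toList = (['&','g','t',';'] : List Char) from by decide,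
        show (">" : String).toList = (['>'] : List Char) from by decide, pvReplace_eq]
  have h4 : ∀ s : String, PySem.Str.replace s "&lt;" "<" = String.ofList (pvRepl ['&','l','t',';'] ['<'] s.toList) := by
    intro s
    rw [PySem.Str.replace, show ("&lt;" : String).toList = (['&','l','t',';'] : List Char) from by decide,
        show ("<" : String).toList = (['<'] : List Char) from by decide, pvReplace_eq]
  have h5 : ∀ s : String, PySem.Str.replace s "&amp;" "&" = String.ofList (pvRepl ['&','a','m','p',';'] ['&'] s.toList) := by
    intro s
    rw [PySem.Str.replace, show ("&amp;" : String).toList = (['&','a','m','p',';'] : List Char) from by decide,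
        show ("&" : String).toList = (['&'] : List Char) from by decide, pvReplace_eq]
  rw [h1, h2, h3, h4, h5]
  simp only [String.toList_ofList]
  exact congrArg String.ofList (pvMain text.toList)
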